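-- pv_equiv track=rewrite | github.com/sumrania/tum_sim | help/combine_segments.py | comb_segs
-- ===== SOURCE A (Python) =====
-- def comb_segs(X_bgns, X_cps):
-- 	num_chrm = len(X_bgns)
-- 	Xi = [ 0 for _ in X_bgns ] # keep track of where we are in each list
-- 	out_bgns = []
-- 	out_X_cps = [ [] for _ in X_bgns ]
--
-- 	cur_bgns = ['Russell ROX #YangYang']
-- 	while cur_bgns:
-- 		cur_bgns = []
-- 		for chrm, chrm_bgns in enumerate(X_bgns):
-- 			cur_i = Xi[chrm]
-- 			if cur_i < len(chrm_bgns):          # make sure we do not index X_bgns out of bounds on a chromosome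
-- 				cur_bgns.append(chrm_bgns[cur_i])
--
-- 		if not cur_bgns:
-- 			return out_X_cps, out_bgns
--
-- 		min_bgn = min(cur_bgns)
-- 		out_bgns.append(min_bgn)
--
-- 		for chrm, chrm_bgns in enumerate(X_bgns):
-- 			cur_i = Xi[chrm]
-- 			if cur_i < len(chrm_bgns):      # make sure we do not index X_bgns out of bounds on a chromosome
-- 				cur_bgn = chrm_bgns[cur_i]
-- 				if min_bgn == cur_bgn:
-- 					Xi[chrm] += 1
-- 		for chrm, cps in enumerate(X_cps):
-- 			out_X_cps[chrm].append(cps[Xi[chrm] - 1])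
-- 	return out_X_cps, out_bgns
-- ===== SOURCE B (Python) =====
-- def comb_segs(X_bgns, X_cps):
--     # Maintain a shrinking list of (chromosome, remaining suffix) "active fronts"
--     # instead of rescanning every chromosome each round; record a trace of
--     # consumed-counts and build out_X_cps by transposing the trace at the end.
--     active = [(c, bgns) for c, bgns in enumerate(X_bgns) if bgns]
--     consumed = [0] * len(X_bgns)
--     out_bgns = []
--     trace = []
--     while active:
--         m = min(b[0] for _, b in active)
--         out_bgns.append(m)
--         nxt = []
--         for c, b in active:
--             if b[0] == m:
--                 consumed[c] += 1
--                 b = b[1:]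
--             if b:
--                 nxt.append((c, b))
--         active = nxt
--         trace.append(list(consumed))
--     out_X_cps = [[] for _ in X_bgns]
--     for c, cps in enumerate(X_cps):
--         out_X_cps[c] = [cps[snap[c] - 1] for snap in trace]
--     return out_X_cps, out_bgns
-- ===== Notes on version B (the rewrite author's own statement) =====
-- stated objective: alternative
-- what changed: B replaces A's per-round rescan of every chromosome (rebuild cur_bgns, advance pass, per-round row-append pass) with a shrinking worklist of active (suffix, chromosome) fronts updated in a single pass per round, recording a trace of consumed-count snapshots and building out_X_cps at the end by transposing the trace. Pre_ additionally excludes inputs where every begins list is empty yet X_cps is longer than X_bgns: A returns before ever touching X_cps, while B's output-assembly loop raises there.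
-- outside the precondition, e.g. on comb_segs([], [[]]): A returns ([], []), B raises IndexError; on comb_segs([[]], [[1], [2]]): A returns ([[]], []), B raises IndexError
import Mathlib
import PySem

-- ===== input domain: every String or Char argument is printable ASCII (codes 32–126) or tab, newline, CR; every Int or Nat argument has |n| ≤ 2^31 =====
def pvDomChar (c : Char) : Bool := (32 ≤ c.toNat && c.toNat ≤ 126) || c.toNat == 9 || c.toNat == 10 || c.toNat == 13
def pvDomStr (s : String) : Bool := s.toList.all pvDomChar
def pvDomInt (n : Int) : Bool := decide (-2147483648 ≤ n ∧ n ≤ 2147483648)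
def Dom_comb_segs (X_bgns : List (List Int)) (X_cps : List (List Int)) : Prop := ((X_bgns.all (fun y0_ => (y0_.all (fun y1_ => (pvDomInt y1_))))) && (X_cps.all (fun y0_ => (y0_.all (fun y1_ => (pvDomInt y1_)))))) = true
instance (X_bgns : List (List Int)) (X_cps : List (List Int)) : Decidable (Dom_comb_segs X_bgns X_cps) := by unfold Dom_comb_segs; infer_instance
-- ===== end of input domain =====

-- B maintains a shrinking worklist of active (suffix, chromosome) fronts and transposes a trace of
-- consumed-counts at the end, instead of A's three per-round passes over all chromosomes (alternative
-- decomposition; return value proved equal on Pre_).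

-- ===== PORT A =====
-- third inner loop: for chrm, cps in enumerate(X_cps): out_X_cps[chrm].append(cps[Xi[chrm]-1])
def combA_appendRows : List (List Int) → List Nat → List (List Int) → List (List Int)
  | outX, _, [] => outX
  | row :: outX, x :: Xi, cps :: cpsR =>
      (row ++ [(PySem.List.pyGet? cps ((x : Int) - 1)).getD 0]) :: combA_appendRows outX Xi cpsR
  | [], _, _ :: _ => []
  | _ :: _, [], _ :: _ => []

-- the while loop; fuel only makes the recursion structural (each Python round advances at least one Xi)
def combA_loop (X_bgns X_cps : List (List Int)) :
    Nat → List Nat → List (List Int) → List Int → List (List Int) × List Int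
  | 0, _, outX, outB => (outX, outB)
  | fuel + 1, Xi, outX, outB =>
    let curBgns := (X_bgns.zip Xi).foldl
      (fun acc p => if p.2 < p.1.length then acc ++ [p.1.getD p.2 0] else acc) []
    match curBgns.min? with
    | none => (outX, outB)
    | some minBgn =>
      let Xi' := (X_bgns.zip Xi).map
        (fun p => if p.2 < p.1.length then (if p.1.getD p.2 0 = minBgn then p.2 + 1 else p.2) else p.2)
      combA_loop X_bgns X_cps fuel Xi' (combA_appendRows outX Xi' X_cps) (outB ++ [minBgn])

def comb_segs (X_bgns : List (List Int)) (X_cps : List (List Int)) : List (List Int) × List Int :=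
  combA_loop X_bgns X_cps ((X_bgns.map List.length).sum + 1)
    (X_bgns.map (fun _ => 0)) (X_bgns.map (fun _ => [])) []

-- ===== PORT B =====
-- while active: pop the minimum front, advance ties in ONE pass, snapshot consumed-counts
def combB_loop : Nat → List (List Int × Nat) → List Nat → List Int → List (List Nat) →
    List Int × List (List Nat)
  | 0, _, _, outB, trace => (outB, trace)
  | fuel + 1, active, consumed, outB, trace =>
    match (active.map (fun p => p.1.headD 0)).min? with
    | none => (outB, trace)
    | some m =>
      let st := active.foldl
        (fun (st : List Nat × List (List Int × Nat)) p =>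
          if p.1.headD 0 = m then
            let cons := st.1.set p.2 (st.1.getD p.2 0 + 1)
            let b := p.1.tail
            if b.isEmpty then (cons, st.2) else (cons, st.2 ++ [(b, p.2)])
          else (st.1, st.2 ++ [(p.1, p.2)]))
        (consumed, [])
      combB_loop fuel st.2 st.1 (outB ++ [m]) (trace ++ [st.1])

-- out_X_cps[c] = [cps[snap[c]-1] for snap in trace] for c < len(X_cps), [] for the rest
def combB_rows (trace : List (List Nat)) : List (List Int) → List (List Int) → Nat → List (List Int)
  | [], _, _ => []
  | _ :: bgns, [], c => [] :: combB_rows trace bgns [] (c + 1)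
  | _ :: bgns, cps :: cpsR, c =>
      (trace.map (fun snap => (PySem.List.pyGet? cps ((snap.getD c 0 : Int) - 1)).getD 0))
        :: combB_rows trace bgns cpsR (c + 1)

def comb_segs_alt (X_bgns : List (List Int)) (X_cps : List (List Int)) : List (List Int) × List Int :=
  let active := X_bgns.zipIdx.filter (fun p => !p.1.isEmpty)
  let r := combB_loop ((X_bgns.map List.length).sum + 1) active (X_bgns.map (fun _ => 0)) [] []
  (combB_rows r.2 X_bgns X_cps 0, r.1)

-- ===== PRECONDITION & SPEC =====
-- Pre_ is where A returns without raising: A raises IndexError when some out_X_cps[chrm] with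
-- chrm ≥ len(X_bgns) is addressed (len(X_cps) > len(X_bgns)) or when, once any begin exists, some
-- cps list is empty or shorter than its begins list (cps[Xi-1] out of range).  Pre_ also excludes
-- inputs where every begins list is empty yet X_cps is longer than X_bgns: A returns before ever
-- touching X_cps, while B's output-assembly loop raises there.
def Pre_comb_segs (X_bgns : List (List Int)) (X_cps : List (List Int)) : Prop :=
  X_cps.length ≤ X_bgns.length ∧
    ((∀ b ∈ X_bgns, b = []) ∨ ∀ p ∈ X_cps.zip X_bgns, max 1 p.2.length ≤ p.1.length)
instance (X_bgns : List (List Int)) (X_cps : List (List Int)) : Decidable (Pre_comb_segs X_bgns X_cps) := by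
  unfold Pre_comb_segs; infer_instance

def pvWitness_comb_segs : List (List Int) × List (List Int) :=
  ([[1, 3], [2, 3]], [[10, 20], [30, 40]])

def Spec_comb_segs (X_bgns : List (List Int)) (X_cps : List (List Int)) (out : List (List Int) × List Int) : Prop := out = comb_segs_alt X_bgns X_cps
instance (X_bgns : List (List Int)) (X_cps : List (List Int)) (out : List (List Int) × List Int) : Decidable (Spec_comb_segs X_bgns X_cps out) := by unfold Spec_comb_segs; infer_instance

-- ===== CLAIM (what is proved, stated in full; the proofs are below) =====
def Claim_equal_comb_segs : Prop := ∀ (X_bgns : List (List Int)) (X_cps : List (List Int)), Dom_comb_segs X_bgns X_cps → Pre_comb_segs X_bgns X_cps → Spec_comb_segs X_bgns X_cps (comb_segs X_bgns X_cps)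

-- ===== LEMMAS AND PROOFS =====

def activeOf : List (List Int) → List Nat → Nat → List (List Int × Nat)
  | [], _, _ => []
  | _ :: _, [], _ => []
  | b :: bs, x :: xs, k =>
      if (b.drop x).isEmpty then activeOf bs xs (k + 1)
      else (b.drop x, k) :: activeOf bs xs (k + 1)
def stepXi (m : Int) (bgns : List (List Int)) (Xi : List Nat) : List Nat :=
  (bgns.zip Xi).map
    (fun p => if p.2 < p.1.length then (if p.1.getD p.2 0 = m then p.2 + 1 else p.2) else p.2)
lemma headD_drop (l : List Int) (n : Nat) : (l.drop n).headD 0 = l.getD n 0 := by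
  simp [List.head?_drop, List.getD_eq_getElem?_getD]

lemma fold_step (m : Int) (bgns : List (List Int)) : ∀ (Xi : List Nat) (k : Nat)
    (cons : List Nat) (nxt0 : List (List Int × Nat)),
    cons.drop k = Xi → Xi.length = bgns.length →
    (activeOf bgns Xi k).foldl
      (fun (st : List Nat × List (List Int × Nat)) p =>
        if p.1.headD 0 = m then
          let cons := st.1.set p.2 (st.1.getD p.2 0 + 1)
          let b := p.1.tail
          if b.isEmpty then (cons, st.2) else (cons, st.2 ++ [(b, p.2)])
        else (st.1, st.2 ++ [(p.1, p.2)]))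
      (cons, nxt0)
    = (cons.take k ++ stepXi m bgns Xi, nxt0 ++ activeOf bgns (stepXi m bgns Xi) k) := by
  induction bgns with
  | nil =>
    intro Xi k cons nxt0 h1 h2
    have hXi : Xi = [] := List.length_eq_zero_iff.1 (by simpa using h2)
    subst hXi
    have : cons.take k = cons := List.take_of_length_le (by
      have := List.drop_eq_nil_iff.1 h1; omega)
    simp [activeOf, stepXi, this]
  | cons b bs ih =>
    intro Xi k cons nxt0 h1 h2
    match Xi, h2 with
    | x :: xs, h2 =>
      have hxs : xs.length = bs.length := by simpa using h2
      have hk : cons[k]? = some x := by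
        have : (cons.drop k)[0]? = some x := by rw [h1]; rfl
        simpa [List.getElem?_drop] using this
      have hklen : k < cons.length := by
        by_contra hc
        rw [List.getElem?_eq_none (by omega)] at hk; simp at hk
      have hgetD : cons.getD k 0 = x := by
        simp [List.getD_eq_getElem?_getD, hk]
      have htail : cons.drop (k + 1) = xs := by
        have := congrArg List.tail h1
        simpa [List.tail_drop] using this
      have htake : cons.take (k + 1) = cons.take k ++ [x] := by
        simp [List.take_add_one, hk]
      have hstep : stepXi m (b :: bs) (x :: xs)
          = (if x < b.length then (if b.getD x 0 = m then x + 1 else x) else x) :: stepXi m bs xs := by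
        simp [stepXi]
      by_cases hx : x < b.length
      · have hne : ¬ (b.drop x).isEmpty := by
          simp [List.isEmpty_iff, List.drop_eq_nil_iff]; omega
        have hhead : (b.drop x).headD 0 = b.getD x 0 := headD_drop b x
        by_cases hm : b.getD x 0 = m
        · -- chromosome consumes: set k := x+1, push the tail suffix if nonempty
          have hcons1 : (cons.set k (x + 1)).drop (k + 1) = xs := by
            rw [List.drop_set, if_pos (by omega)]; exact htail
          have htake1 : (cons.set k (x + 1)).take (k + 1) = cons.take k ++ [x + 1] := by
            rw [List.take_add_one, List.getElem?_set_self hklen, List.take_set,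
              List.set_eq_of_length_le (by simp)]
            rfl
          by_cases hb1 : (b.drop (x + 1)).isEmpty
          · simp only [activeOf, if_neg hne, List.foldl_cons, hhead, if_pos hm, hgetD,
              List.tail_drop, hstep, if_pos hx, if_pos hb1]
            rw [ih xs (k + 1) _ _ hcons1 hxs, htake1]
            simp
          · simp only [activeOf, if_neg hne, List.foldl_cons, hhead, if_pos hm, hgetD,
              List.tail_drop, hstep, if_pos hx, if_neg hb1]
            rw [ih xs (k + 1) _ _ hcons1 hxs, htake1]
            simp
        · -- front ≠ min: untouched, suffix stays active
          simp only [activeOf, if_neg hne, List.foldl_cons, hhead, if_neg hm, hgetD, hstep,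
            if_pos hx]
          rw [ih xs (k + 1) _ _ htail hxs, htake]
          simp
      · have he : (b.drop x).isEmpty := by
          simp [List.isEmpty_iff, List.drop_eq_nil_iff]; omega
        simp only [activeOf, if_pos he, hstep, if_neg hx]
        rw [ih xs (k + 1) _ _ htail hxs, htake]
        simp
lemma rows_empty_cps (trace trace' : List (List Nat)) (bgns : List (List Int)) : ∀ (c c' : Nat),
    combB_rows trace bgns [] c = combB_rows trace' bgns [] c' := by
  induction bgns with
  | nil => intro c c'; rfl
  | cons b bs ih => intro c c'; simp only [combB_rows]; exact congrArg _ (ih _ _)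

lemma rows_nil (bgns : List (List Int)) : ∀ (cps : List (List Int)) (c : Nat),
    combB_rows [] bgns cps c = bgns.map (fun _ => []) := by
  induction bgns with
  | nil => intro cps c; cases cps <;> rfl
  | cons b bs ih =>
    intro cps c
    cases cps with
    | nil => simp only [combB_rows, List.map_cons]; exact congrArg _ (ih _ _)
    | cons cp cpsR => simp only [combB_rows, List.map_nil, List.map_cons]; exact congrArg _ (ih _ _)

lemma rows_snoc (XiFull : List Nat) (trace : List (List Nat)) :
    ∀ (bgns cps : List (List Int)) (c : Nat) (XiS : List Nat),
    XiS = XiFull.drop c → XiS.length = bgns.length →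
    combA_appendRows (combB_rows trace bgns cps c) XiS cps
      = combB_rows (trace ++ [XiFull]) bgns cps c := by
  intro bgns
  induction bgns with
  | nil =>
    intro cps c XiS h1 h2
    cases cps <;> simp [combB_rows, combA_appendRows]
  | cons b bs ih =>
    intro cps c XiS h1 h2
    match XiS, h2 with
    | x :: xs, h2 =>
      cases cps with
      | nil =>
        simp only [combB_rows, combA_appendRows]
        exact congrArg _ (rows_empty_cps _ _ _ _ _)
      | cons cp cpsR =>
        simp only [combB_rows, combA_appendRows, List.map_append, List.map_cons, List.map_nil]
        have hc : c < XiFull.length := by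
          by_contra hc
          have : XiFull.drop c = [] := List.drop_eq_nil_iff.2 (by omega)
          rw [this] at h1; simp at h1
        have hx : XiFull.getD c 0 = x := by
          have := congrArg (fun l => List.headD l 0) h1
          simpa [List.head?_drop, List.getD_eq_getElem?_getD] using this.symm
        rw [hx]
        refine congrArg _ (ih cpsR (c+1) xs (by
            have := congrArg List.tail h1
            simpa [List.tail_drop] using this) (by simpa using h2))

lemma curBgns_eq (bgns : List (List Int)) : ∀ (Xi : List Nat) (k : Nat) (acc : List Int),
    Xi.length = bgns.length →
    (bgns.zip Xi).foldl (fun acc p => if p.2 < p.1.length then acc ++ [p.1.getD p.2 0] else acc) acc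
      = acc ++ (activeOf bgns Xi k).map (fun p => p.1.headD 0) := by
  induction bgns with
  | nil => intro Xi k acc h; simp [activeOf]
  | cons b bs ih =>
    intro Xi k acc h
    match Xi with
    | x :: xs =>
      simp only [List.zip_cons_cons, List.foldl_cons, activeOf]
      by_cases hx : x < b.length
      · have hne : ¬ (b.drop x).isEmpty := by
          simp [List.isEmpty_iff, List.drop_eq_nil_iff]; omega
        rw [if_pos hx, if_neg hne, ih xs (k+1) _ (by simpa using h)]
        simp
      · have he : (b.drop x).isEmpty := by
          simp [List.isEmpty_iff, List.drop_eq_nil_iff]; omega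
        rw [if_neg hx, if_pos he, ih xs (k+1) _ (by simpa using h)]

lemma active_init (bgns : List (List Int)) : ∀ (k : Nat),
    (bgns.zipIdx k).filter (fun p => !p.1.isEmpty) = activeOf bgns (bgns.map (fun _ => 0)) k := by
  induction bgns with
  | nil => intro k; simp [activeOf]
  | cons b bs ih =>
    intro k
    simp only [List.zipIdx_cons, List.filter_cons, List.map_cons, activeOf, List.drop_zero]
    by_cases hb : b.isEmpty
    · simp [hb, ih]
    · simp [hb, ih]

lemma stepXi_length (m : Int) (bgns : List (List Int)) (Xi : List Nat)
    (h : Xi.length = bgns.length) : (stepXi m bgns Xi).length = bgns.length := by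
  simp [stepXi, h]

lemma sim (bgns cps : List (List Int)) : ∀ (fuel : Nat) (Xi : List Nat) (trace : List (List Nat))
    (outB : List Int), Xi.length = bgns.length →
    combA_loop bgns cps fuel Xi (combB_rows trace bgns cps 0) outB
      = ((combB_rows (combB_loop fuel (activeOf bgns Xi 0) Xi outB trace).2 bgns cps 0),
         (combB_loop fuel (activeOf bgns Xi 0) Xi outB trace).1) := by
  intro fuel
  induction fuel with
  | zero => intro Xi trace outB h; simp [combA_loop, combB_loop]
  | succ fuel ih =>
    intro Xi trace outB h
    simp only [combA_loop, combB_loop]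
    rw [curBgns_eq bgns Xi 0 [] h, List.nil_append]
    cases hmin : ((activeOf bgns Xi 0).map (fun p => p.1.headD 0)).min? with
    | none => simp
    | some m =>
      dsimp only
      rw [fold_step m bgns Xi 0 Xi [] rfl h]
      simp only [List.take_zero, List.nil_append]
      have hXi' : (bgns.zip Xi).map
          (fun p => if p.2 < p.1.length then (if p.1.getD p.2 0 = m then p.2 + 1 else p.2) else p.2)
          = stepXi m bgns Xi := rfl
      rw [hXi', rows_snoc (stepXi m bgns Xi) trace bgns cps 0 (stepXi m bgns Xi) rfl
        (stepXi_length m bgns Xi h)]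
      exact ih (stepXi m bgns Xi) (trace ++ [stepXi m bgns Xi]) (outB ++ [m])
        (stepXi_length m bgns Xi h)

-- ===== VERDICT (by name: the statement is the Claim_ definition above) =====
theorem comb_segs_spec : Claim_equal_comb_segs := by
  intro X_bgns X_cps _ _
  unfold Spec_comb_segs comb_segs comb_segs_alt
  rw [← rows_nil X_bgns X_cps 0, sim X_bgns X_cps _ _ [] [] (by simp), active_init X_bgns 0]
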